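-- pv_equiv track=rewrite | github.com/kkatsamaktsis/PyDiscourseSimplification | discoursesimplification/utils/words/words_utils.py | words_to_proper_sentence
-- ===== SOURCE A (Python) =====
-- from typing import List
--
-- def capitalize_word(word):
--     if len(word) > 0:
--         word = word[0].upper() + word[1:]
--
--     return word
--
-- def words_to_proper_sentence(words: List[any]):
--     res = []
--     res.extend(words)
--
--     for c in [".", ","]:
--         prev = None
--         i = 0
--         while i < len(res):
--             word = res[i]
--
--             if word == c:
--                 if prev is None or prev == word:
--                     del res[i]
--                     i -= 1
--             prev = word
--             i += 1
--
--         if len(res) > 0 and res[len(res) - 1] == c: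
--             del res[len(res) - 1]
--
--     # add a '.' at the end
--     res.append(".")
--
--     # capitalize first word
--     if len(res) > 0:
--         res[0] = capitalize_word(res[0])
--
--     return res
-- ===== SOURCE B (Python) =====
-- from itertools import groupby
--
-- def words_to_proper_sentence(words):
--     res = list(words)
--     for c in [".", ","]:
--         groups = [(k, list(g)) for k, g in groupby(res)]
--         n = len(groups)
--         out = []
--         for idx, (k, g) in enumerate(groups):
--             if k == c:
--                 if 0 < idx < n - 1:
--                     out.append(c)
--             else:
--                 out.extend(g)
--         res = out
--     res.append(".")
--     res[0] = res[0][:1].upper() + res[0][1:]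
--     return res
-- ===== Notes on version B (the rewrite author's own statement) =====
-- stated objective: idiomatic
-- what changed: Each of A's in-place-deletion index loops (while with del res[i]; i -= 1, plus a trailing-element delete) is replaced by an itertools.groupby run-length pass that rebuilds the list from (key, group) pairs, emitting one separator per interior separator run and none for the first or last group.
import Mathlib
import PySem

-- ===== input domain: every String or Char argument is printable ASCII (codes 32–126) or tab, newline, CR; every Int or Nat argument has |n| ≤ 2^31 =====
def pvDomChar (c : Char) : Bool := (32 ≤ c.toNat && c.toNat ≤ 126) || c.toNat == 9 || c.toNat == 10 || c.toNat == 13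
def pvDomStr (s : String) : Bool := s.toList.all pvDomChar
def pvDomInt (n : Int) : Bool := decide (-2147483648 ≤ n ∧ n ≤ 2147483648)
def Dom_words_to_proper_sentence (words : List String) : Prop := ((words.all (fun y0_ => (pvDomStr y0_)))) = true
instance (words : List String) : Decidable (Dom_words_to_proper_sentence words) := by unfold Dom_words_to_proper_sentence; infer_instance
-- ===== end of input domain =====

-- B replaces A's in-place-deletion index loops with itertools.groupby run-length passes
-- (rebuild from (key, group) pairs, keeping one separator per interior run); objective: idiomatic.

-- ===== PORT A =====
-- capitalize_word: word[0].upper() + word[1:] (index 0 is in range by the guard, so getD is unreachable)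
def capitalize_word (word : String) : String :=
  if 0 < PySem.Str.len word then
    String.ofList (PySem.Chars.upperChar ((PySem.Str.pyGet? word 0).getD ' ')
      :: (PySem.Str.slice word (some 1) none).toList)
  else word

-- the 'while i < len(res)' loop with in-place 'del res[i]; i -= 1' and 'prev = word; i += 1'
def loopA (c : String) (res : List String) (i : Nat) (prev : Option String) : List String :=
  if h : i < res.length then
    let word := res[i]
    if word = c then
      if prev = none ∨ prev = some word then
        loopA c (res.eraseIdx i) i (some word)     -- del res[i]; i -= 1; prev = word; i += 1
      else loopA c res (i + 1) (some word)
    else loopA c res (i + 1) (some word)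
  else res
termination_by res.length - i
decreasing_by
  · have : (res.eraseIdx i).length = res.length - 1 := by simp [List.length_eraseIdx, h]
    omega
  · omega
  · omega

-- one pass for a separator c: the while loop, then 'if len(res) > 0 and res[len(res)-1] == c: del res[len(res)-1]'
def passA (c : String) (res : List String) : List String :=
  let r := loopA c res 0 none
  if 0 < r.length ∧ r.getD (r.length - 1) "" = c then r.eraseIdx (r.length - 1) else r

def words_to_proper_sentence (words : List String) : List String :=
  let res := [] ++ words                                   -- res = []; res.extend(words)
  let res := [".", ","].foldl (fun r c => passA c r) res   -- for c in [".", ","]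
  let res := res ++ ["."]                                  -- res.append(".")
  if 0 < res.length then res.set 0 (capitalize_word (res.getD 0 "")) else res

-- ===== PORT B =====
-- itertools.groupby(res): the list of (key, group) run-length pairs
def pyGroupBy (xs : List String) : List (String × List String) :=
  match xs with
  | [] => []
  | x :: rest =>
    (x, x :: rest.takeWhile (· = x)) :: pyGroupBy (rest.dropWhile (· = x))
termination_by xs.length
decreasing_by
  exact Nat.lt_succ_of_le (List.length_dropWhile_le _ _)

-- one pass for separator c: rebuild from the groups; a c-run contributes one c iff it is interior
def passB (c : String) (res : List String) : List String :=
  let groups := pyGroupBy res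
  let n := groups.length
  (groups.zipIdx).foldl
    (fun out p =>
      if p.1.1 = c then
        if 0 < p.2 ∧ p.2 < n - 1 then out ++ [c] else out
      else out ++ p.1.2) []

def words_to_proper_sentence_alt (words : List String) : List String :=
  let res := words                                          -- res = list(words)
  let res := [".", ","].foldl (fun r c => passB c r) res
  let res := res ++ ["."]
  match res with
  | [] => []                                                -- unreachable: res ends with "."
  | w :: rest =>                                            -- res[0] = res[0][:1].upper() + res[0][1:]
      String.ofList (PySem.Chars.upper (PySem.Str.slice w none (some 1)).toList
        ++ (PySem.Str.slice w (some 1) none).toList) :: rest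

-- ===== PRECONDITION & SPEC =====
def Spec_words_to_proper_sentence (words : List String) (out : List String) : Prop := out = words_to_proper_sentence_alt words
instance (words : List String) (out : List String) : Decidable (Spec_words_to_proper_sentence words out) := by unfold Spec_words_to_proper_sentence; infer_instance

-- ===== CLAIM (what is proved, stated in full; the proofs are below) =====
def Claim_equal_words_to_proper_sentence : Prop := ∀ (words : List String), Dom_words_to_proper_sentence words → Spec_words_to_proper_sentence words (words_to_proper_sentence words)

-- ===== LEMMAS AND PROOFS =====

-- functional characterisation of A's while loop: keep x unless x = c and (no previous word, or it was also c)
def scanSpec (c : String) (prev : Option String) : List String → List String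
  | [] => []
  | x :: xs =>
    if x = c ∧ (prev = none ∨ prev = some x) then scanSpec c (some x) xs
    else x :: scanSpec c (some x) xs

lemma take_eraseIdx (res : List String) (i : Nat) (h : i < res.length) :
    (res.eraseIdx i).take i = res.take i := by
  rw [List.eraseIdx_eq_take_drop_succ, List.take_append]
  simp [List.length_take, Nat.min_eq_left (Nat.le_of_lt h), List.take_take]

lemma drop_eraseIdx (res : List String) (i : Nat) (h : i < res.length) :
    (res.eraseIdx i).drop i = res.drop (i+1) := by
  rw [List.eraseIdx_eq_take_drop_succ, List.drop_append]
  simp [List.length_take, Nat.min_eq_left (Nat.le_of_lt h)]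

lemma loopA_eq_scanSpec (c : String) (res : List String) (i : Nat) (prev : Option String) :
    loopA c res i prev = res.take i ++ scanSpec c prev (res.drop i) := by
  induction res, i, prev using loopA.induct c with
  | case1 res i prev h word hw hprev ih =>
      rw [loopA, dif_pos h, if_pos hw, if_pos hprev, ih,
        take_eraseIdx res i h, drop_eraseIdx res i h,
        List.drop_eq_getElem_cons h, scanSpec, if_pos ⟨hw, hprev⟩]
  | case2 res i prev h word hw hprev ih =>
      rw [loopA, dif_pos h, if_pos hw, if_neg hprev, ih,
        List.drop_eq_getElem_cons h, scanSpec,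
        if_neg (by exact fun hc => hprev hc.2),
        List.take_succ_eq_append_getElem h, List.append_assoc, List.singleton_append]
  | case3 res i prev h word hx ih =>
      rw [loopA, dif_pos h, if_neg hx, ih,
        List.drop_eq_getElem_cons h, scanSpec,
        if_neg (by exact fun hc => hx hc.1),
        List.take_succ_eq_append_getElem h, List.append_assoc, List.singleton_append]
  | case4 res i prev h =>
      rw [loopA, dif_neg h, List.drop_eq_nil_of_le (by omega), scanSpec,
        List.append_nil, List.take_of_length_le (by omega)]

-- A's trailing deletion, as written in passA
def chop (c : String) (r : List String) : List String :=
  if 0 < r.length ∧ r.getD (r.length - 1) "" = c then r.eraseIdx (r.length - 1) else r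

lemma eraseIdx_last (l : List String) : l.eraseIdx (l.length - 1) = l.dropLast := by
  rcases l.eq_nil_or_concat with rfl | ⟨a, b, rfl⟩
  · simp
  · simp [List.eraseIdx_append_of_length_le]

lemma getD_last (l : List String) : l.getD (l.length - 1) "" = l.getLast?.getD "" := by
  rcases l.eq_nil_or_concat with rfl | ⟨a, b, rfl⟩ <;> simp

lemma chop_append (c : String) (a s : List String) (hs : s ≠ []) :
    chop c (a ++ s) = a ++ chop c s := by
  unfold chop
  rw [getD_last, getD_last, List.getLast?_append_of_ne_nil a hs,
    eraseIdx_last, eraseIdx_last, List.dropLast_append_of_ne_nil hs]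
  have h1 : 0 < (a ++ s).length := by
    simp [List.length_append]
    cases s with | nil => exact absurd rfl hs | cons x t => simp
  have h2 : 0 < s.length := List.length_pos_iff.mpr hs
  simp only [h1, h2, true_and]
  split_ifs with hc <;> rfl

lemma scanSpec_prev_irrel (c : String) (prev prev' : Option String) (l : List String)
    (h : ∀ y ∈ l.head?, y ≠ c) :
    scanSpec c prev l = scanSpec c prev' l := by
  cases l with
  | nil => rfl
  | cons x xs =>
      have hx : x ≠ c := h x rfl
      simp [scanSpec, hx]

-- scanSpec over a run of x ≠ c copies the run
lemma scanSpec_run_ne (c x : String) (hx : x ≠ c) (run rest : List String)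
    (hr : ∀ y ∈ run, y = x) (prev : Option String) :
    scanSpec c prev (x :: (run ++ rest)) = x :: (run ++ scanSpec c (some x) rest) := by
  induction run generalizing prev with
  | nil => simp [scanSpec, hx]
  | cons y t ih =>
      have hy : y = x := hr y (by simp)
      subst hy
      have h2 := ih (fun z hz => hr z (List.mem_cons_of_mem _ hz)) (some y)
      simp only [List.cons_append] at h2 ⊢
      conv_lhs => rw [scanSpec]
      rw [if_neg (fun hc => hx hc.1), h2]

-- scanSpec over a run of c with prev = c drops the whole run
lemma scanSpec_run_c (c : String) (run rest : List String)
    (hr : ∀ y ∈ run, y = c) :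
    scanSpec c (some c) (run ++ rest) = scanSpec c (some c) rest := by
  induction run with
  | nil => rfl
  | cons y t ih =>
      have hy : y = c := hr y (by simp)
      subst hy
      simp only [List.cons_append]
      conv_lhs => rw [scanSpec]
      rw [if_pos ⟨rfl, Or.inr rfl⟩]
      exact ih (fun z hz => hr z (by simp [hz]))

-- emit: the body of B's "for idx, (k, g) in enumerate(groups)" loop, as a recursion carrying idx
def emitSpec (c : String) (n : Nat) (idx : Nat) : List (String × List String) → List String
  | [] => []
  | (k, g) :: rest =>
      (if k = c then (if 0 < idx ∧ idx < n - 1 then [c] else []) else g) ++ emitSpec c n (idx + 1) rest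

lemma head?_dropWhile_ne (p : String → Bool) (l : List String) (y : String)
    (h : (l.dropWhile p).head? = some y) : p y = false := by
  have hne : l.dropWhile p ≠ [] := by intro e; rw [e] at h; simp at h
  have hy : (l.dropWhile p).head hne = y := by
    rwa [List.head_eq_iff_head?_eq_some]
  rw [← hy]
  simpa using List.head_dropWhile_not p hne

lemma scanSpec_cons_ne_nil (c q y : String) (l : List String) (h : y ≠ q ∨ y ≠ c) :
    scanSpec c (some q) (y :: l) ≠ [] := by
  rw [scanSpec, if_neg]
  · simp
  · rintro ⟨rfl, h2 | h2⟩
    · simp at h2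
    · rcases h with h | h
      · exact h (by simpa using h2.symm)
      · exact h rfl

lemma getLast_run (x : String) (run : List String) (hr : ∀ y ∈ run, y = x) :
    (x :: run).getLast?.getD "" = x := by
  rw [List.getLast?_eq_some_getLast (by simp)]
  have := List.getLast_mem (l := x :: run) (by simp)
  simp only [Option.getD_some]
  rcases List.mem_cons.mp this with h | h
  · exact h
  · exact hr _ h

lemma chop_of_last_ne (c : String) (r : List String) (h : r.getLast?.getD "" ≠ c) :
    chop c r = r := by
  unfold chop
  rw [getD_last, if_neg]
  rintro ⟨_, h2⟩
  exact h h2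

lemma mem_run_eq (x : String) (rest : List String) (y : String)
    (h : y ∈ rest.takeWhile (· = x)) : y = x := by
  have := List.mem_takeWhile_imp h
  simpa using this

-- the key lemma: B's group emission computes A's scan followed by the trailing deletion
lemma emit_eq_chop_scan (c : String) :
    ∀ (rest : List String) (idx n : Nat) (prev : Option String),
      ((idx = 0 ∧ prev = none) ∨ (1 ≤ idx ∧ ∃ q, prev = some q ∧ q ≠ c)) →
      idx + (pyGroupBy rest).length = n →
      emitSpec c n idx (pyGroupBy rest) = chop c (scanSpec c prev rest) := by
  intro rest
  induction rest using pyGroupBy.induct with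
  | case1 =>
      intro idx n prev hp hn
      simp [pyGroupBy, emitSpec, scanSpec, chop]
  | case2 x rest ih =>
      intro idx n prev hp hn
      rw [pyGroupBy] at hn ⊢
      simp only [emitSpec]
      have hrun : ∀ y ∈ rest.takeWhile (· = x), y = x := fun y hy => mem_run_eq x rest y hy
      rw [show x :: rest = x :: (rest.takeWhile (· = x) ++ rest.dropWhile (· = x)) by
        rw [List.takeWhile_append_dropWhile]]
      by_cases hx : x = c
      · subst hx
        simp only [if_true]
        rcases hp with ⟨hidx, hprev⟩ | ⟨hidx, q, hprev, hq⟩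
        · subst hprev hidx
          rw [show scanSpec x none (x :: (rest.takeWhile (· = x) ++ rest.dropWhile (· = x)))
              = scanSpec x (some x) (rest.dropWhile (· = x)) by
            conv_lhs => rw [scanSpec]
            rw [if_pos ⟨rfl, Or.inl rfl⟩, scanSpec_run_c x _ _ hrun]]
          rw [if_neg (show ¬((0:Nat) < 0 ∧ 0 < n - 1) by omega), List.nil_append]
          rcases hdw : rest.dropWhile (· = x) with _ | ⟨y, t⟩
          · rw [hdw] at ih hn
            simp [pyGroupBy, emitSpec, scanSpec, chop]
          · have hy : y ≠ x := by
              have := head?_dropWhile_ne (· = x) rest y (by rw [hdw]; rfl)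
              simpa using this
            rw [hdw] at ih hn
            simp only [List.length_cons] at hn
            rw [scanSpec_prev_irrel x (some x) (some y) (y :: t)
              (by intro z hz; simp at hz; subst hz; exact hy)]
            exact ih 1 n (some y) (Or.inr ⟨le_refl 1, y, rfl, hy⟩) (by omega)
        · have hkept : scanSpec x prev (x :: (rest.takeWhile (· = x) ++ rest.dropWhile (· = x)))
              = x :: scanSpec x (some x) (rest.dropWhile (· = x)) := by
            conv_lhs => rw [scanSpec]
            rw [if_neg (by rintro ⟨-, h | h⟩
                           · rw [hprev] at h; exact Option.some_ne_none q h
                           · rw [hprev] at h; exact hq (by injection h)),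
              scanSpec_run_c x _ _ hrun]
          rw [hkept]
          rcases hdw : rest.dropWhile (· = x) with _ | ⟨y, t⟩
          · rw [hdw] at ih hn
            have hn1 : n = idx + 1 := by
              simp only [List.length_cons] at hn
              simp [pyGroupBy] at hn
              omega
            rw [if_neg (by omega)]
            simp [pyGroupBy, emitSpec, scanSpec, chop]
          · have hy : y ≠ x := by
              have := head?_dropWhile_ne (· = x) rest y (by rw [hdw]; rfl)
              simpa using this
            rw [hdw] at ih hn
            simp only [List.length_cons] at hn
            have hlen : 1 ≤ (pyGroupBy (y :: t)).length := by rw [pyGroupBy]; simp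
            rw [if_pos (show 0 < idx ∧ idx < n - 1 by omega)]
            have hirr : scanSpec x (some x) (y :: t) = scanSpec x (some y) (y :: t) :=
              scanSpec_prev_irrel x (some x) (some y) (y :: t)
                (by intro z hz; simp at hz; subst hz; exact hy)
            have hs : scanSpec x (some x) (y :: t) ≠ [] := by
              rw [hirr]; exact scanSpec_cons_ne_nil x y y t (Or.inr hy)
            rw [show (x :: scanSpec x (some x) (y :: t))
                = [x] ++ scanSpec x (some x) (y :: t) from rfl,
              chop_append x [x] _ hs, hirr]
            rw [ih (idx + 1) n (some y) (Or.inr ⟨by omega, y, rfl, hy⟩) (by omega)]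
      · rw [if_neg hx]
        rw [scanSpec_run_ne c x hx _ _ hrun prev]
        rcases hdw : rest.dropWhile (· = x) with _ | ⟨y, t⟩
        · rw [hdw] at ih hn
          simp only [pyGroupBy, emitSpec, List.append_nil, scanSpec]
          rw [chop_of_last_ne c (x :: rest.takeWhile (· = x))
            (by rw [getLast_run x _ hrun]; exact hx)]
        · have hy : y ≠ x := by
            have := head?_dropWhile_ne (· = x) rest y (by rw [hdw]; rfl)
            simpa using this
          rw [hdw] at ih hn
          simp only [List.length_cons] at hn
          have hs : scanSpec c (some x) (y :: t) ≠ [] :=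
            scanSpec_cons_ne_nil c x y t (Or.inl hy)
          rw [show (x :: (rest.takeWhile (· = x) ++ scanSpec c (some x) (y :: t)))
              = (x :: rest.takeWhile (· = x)) ++ scanSpec c (some x) (y :: t) from rfl,
            chop_append c _ _ hs]
          rw [ih (idx + 1) n (some x) (Or.inr ⟨by omega, x, rfl, hx⟩) (by omega)]

lemma foldl_emit (c : String) (n : Nat) (gs : List (String × List String)) (idx : Nat)
    (out : List String) :
    (gs.zipIdx idx).foldl
      (fun out p =>
        if p.1.1 = c then
          if 0 < p.2 ∧ p.2 < n - 1 then out ++ [c] else out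
        else out ++ p.1.2) out = out ++ emitSpec c n idx gs := by
  induction gs generalizing idx out with
  | nil => simp [emitSpec]
  | cons g rest ih =>
      obtain ⟨k, grp⟩ := g
      simp only [List.zipIdx_cons, List.foldl_cons, emitSpec, ih]
      split_ifs <;> simp

lemma pass_eq (c : String) (res : List String) : passA c res = passB c res := by
  have hA : passA c res = chop c (scanSpec c none res) := by
    unfold passA chop
    rw [loopA_eq_scanSpec]
    simp
  have hB : passB c res = emitSpec c (pyGroupBy res).length 0 (pyGroupBy res) := by
    unfold passB
    rw [foldl_emit]
    simp
  rw [hA, hB, emit_eq_chop_scan c res 0 (pyGroupBy res).length none (Or.inl ⟨rfl, rfl⟩) (by simp)]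

-- A's guarded capitalize_word agrees with B's inlined word[:1].upper() + word[1:]
lemma cap_eq (w : String) :
    capitalize_word w =
      String.ofList (PySem.Chars.upper (PySem.Str.slice w none (some 1)).toList
        ++ (PySem.Str.slice w (some 1) none).toList) := by
  unfold capitalize_word
  cases hw : w.toList with
  | nil =>
      have hww : w = "" := by
        have := @String.ofList_toList w
        rw [hw] at this
        exact this.symm
      subst hww
      simp [PySem.Str.len, PySem.Chars.upper]
      constructor <;> decide
  | cons ch rest =>
      rw [if_pos (by simp [hw])]
      congr 1
      have h1 : (PySem.Str.slice w none (some 1)).toList = [ch] := by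
        simp [PySem.List.slice_to _ (by norm_num : (0:Int) ≤ 1), hw]
      have h2 : (PySem.Str.slice w (some 1) none).toList = rest := by
        simp [PySem.List.slice_from _ (by norm_num : (0:Int) ≤ 1), hw]
      have h3 : (PySem.Str.pyGet? w 0).getD ' ' = ch := by
        simp [hw]
      rw [h1, h2, h3]
      simp [PySem.Chars.upper]

-- ===== VERDICT (by name: the statement is the Claim_ definition above) =====
theorem words_to_proper_sentence_spec : Claim_equal_words_to_proper_sentence := by
  intro words _
  unfold Spec_words_to_proper_sentence
  unfold words_to_proper_sentence words_to_proper_sentence_alt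
  simp only [List.nil_append, List.foldl_cons, List.foldl_nil, pass_eq]
  generalize passB "," (passB "." words) = r
  cases r with
  | nil => simp [cap_eq]
  | cons w t => simp [cap_eq]
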